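-- pv_equiv track=rewrite | github.com/kiranbaby14/Docu-Watch | apps/backend/google_ai_implementation.py | _likely_contains_table
-- ===== SOURCE A (Python) =====
-- def _likely_contains_table(text: str) -> bool:
--     """Simple heuristic to detect if text likely contains tables"""
--     # Check for common table indicators
--     table_indicators = [
--         text.count("|") > 5,
--         text.count("\t") > 5,
--         text.count("  ") > 10,  # Multiple spaces
--         any(line.count(",") > 3 for line in text.split("\n")),
--     ]
--     return any(table_indicators)
-- ===== SOURCE B (Python) =====
-- def _likely_contains_table(text: str) -> bool:
--     """Single pass over the characters: running counts for '|', '\t',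
--     non-overlapping double-space pairs, and commas in the current line,
--     with early exit as soon as any threshold is crossed."""
--     pipes = 0
--     tabs = 0
--     doubles = 0
--     pending = False
--     commas = 0
--     for c in text:
--         if c == "|":
--             pipes += 1
--             if pipes > 5:
--                 return True
--             pending = False
--         elif c == "\t":
--             tabs += 1
--             if tabs > 5:
--                 return True
--             pending = False
--         elif c == " ":
--             if pending:
--                 doubles += 1
--                 if doubles > 10:
--                     return True
--                 pending = False
--             else:
--                 pending = True
--         elif c == "\n":
--             commas = 0
--             pending = False
--         elif c == ",":
--             commas += 1
--             if commas > 3: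
--                 return True
--             pending = False
--         else:
--             pending = False
--     return False
-- ===== Notes on version B (the rewrite author's own statement) =====
-- stated objective: alternative
-- what changed: Replaced A's four independent scans (three text.count calls plus a per-line comma generator over text.split) by one single-pass character loop maintaining running counters for pipes, tabs, non-overlapping double-space pairs and commas-in-current-line, with early exit at the thresholds.
import Mathlib
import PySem

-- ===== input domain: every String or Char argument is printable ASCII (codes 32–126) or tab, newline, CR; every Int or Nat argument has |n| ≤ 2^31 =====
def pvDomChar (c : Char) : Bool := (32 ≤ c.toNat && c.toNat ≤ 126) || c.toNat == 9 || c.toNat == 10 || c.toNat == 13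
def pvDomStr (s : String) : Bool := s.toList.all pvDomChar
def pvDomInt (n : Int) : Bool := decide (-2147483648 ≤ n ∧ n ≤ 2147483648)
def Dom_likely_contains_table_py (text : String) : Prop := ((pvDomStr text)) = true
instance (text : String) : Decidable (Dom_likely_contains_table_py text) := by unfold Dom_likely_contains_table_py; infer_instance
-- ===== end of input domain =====

-- B replaces A's four independent scans with one single-pass loop over the characters
-- keeping running counters and exiting early at the thresholds (objective: alternative).

-- ===== PORT A =====
-- literal transliteration of A: four indicator booleans, then any().
-- (text.split("\n") never raises since the separator is nonempty; .getD [] only totalizes the Option)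
def likely_contains_table_py (text : String) : Bool :=
  let table_indicators : List Bool :=
    [ decide (PySem.Str.count text "|" > 5),
      decide (PySem.Str.count text "\t" > 5),
      decide (PySem.Str.count text "  " > 10),
      ((PySem.Str.split? text "\n").getD []).any
        (fun line => decide (PySem.Str.count line "," > 3)) ]
  table_indicators.any id

-- ===== PORT B =====
-- single pass over the characters, following Source B's loop state exactly:
-- (pipes, tabs, doubles, pending-space flag, commas in the current line), early True.
def pvAltLoop : List Char → Nat → Nat → Nat → Bool → Nat → Bool
  | [], _, _, _, _, _ => false
  | c :: cs, pipes, tabs, doubles, pending, commas =>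
    if c = '|' then
      if pipes + 1 > 5 then true else pvAltLoop cs (pipes + 1) tabs doubles false commas
    else if c = '\t' then
      if tabs + 1 > 5 then true else pvAltLoop cs pipes (tabs + 1) doubles false commas
    else if c = ' ' then
      if pending then
        if doubles + 1 > 10 then true else pvAltLoop cs pipes tabs (doubles + 1) false commas
      else pvAltLoop cs pipes tabs doubles true commas
    else if c = '\n' then pvAltLoop cs pipes tabs doubles false 0
    else if c = ',' then
      if commas + 1 > 3 then true else pvAltLoop cs pipes tabs doubles false (commas + 1)
    else pvAltLoop cs pipes tabs doubles false commas

def likely_contains_table_py_alt (text : String) : Bool :=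
  pvAltLoop text.toList 0 0 0 false 0

-- ===== PRECONDITION & SPEC =====
def Spec_likely_contains_table_py (text : String) (out : Bool) : Prop := out = likely_contains_table_py_alt text
instance (text : String) (out : Bool) : Decidable (Spec_likely_contains_table_py text out) := by unfold Spec_likely_contains_table_py; infer_instance

-- ===== CLAIM (what is proved, stated in full; the proofs are below) =====
def Claim_equal_likely_contains_table_py : Prop := ∀ (text : String), Dom_likely_contains_table_py text → Spec_likely_contains_table_py text (likely_contains_table_py text)

-- ===== LEMMAS AND PROOFS =====

-- number of non-overlapping "  " pairs in the remainder, given whether a space is pending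
def pvDC : Bool → List Char → Nat
  | _, [] => 0
  | pend, c :: cs => if c = ' ' then (if pend then 1 + pvDC false cs else pvDC true cs) else pvDC false cs

-- "some line has more than 3 commas", with `com` commas already seen on the current line
def pvCA : Nat → List Char → Bool
  | com, [] => decide (com > 3)
  | com, c :: cs =>
    if c = '\n' then (decide (com > 3) || pvCA 0 cs)
    else if c = ',' then pvCA (com + 1) cs
    else pvCA com cs

-- split on '\n' with `pre` already accumulated on the current line
def pvLines : List Char → List Char → List (List Char)
  | pre, [] => [pre]
  | pre, c :: cs => if c = '\n' then pre :: pvLines [] cs else pvLines (pre ++ [c]) cs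


theorem pv_go_nil (sub : List Char) (fuel acc : Nat) :
    PySem.Chars.count.go sub fuel [] acc = acc := by
  cases fuel <;> simp [PySem.Chars.count.go]

theorem pv_countGo_single (ch : Char) :
    ∀ (fuel : Nat) (l : List Char) (acc : Nat), l.length ≤ fuel →
      PySem.Chars.count.go [ch] fuel l acc = acc + l.count ch := by
  intro fuel
  induction fuel with
  | zero =>
    intro l acc h
    have : l = [] := List.eq_nil_of_length_eq_zero (Nat.le_zero.mp h)
    subst this; simp [PySem.Chars.count.go]
  | succ n ih =>
    intro l acc h
    cases l with
    | nil => simp [PySem.Chars.count.go]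
    | cons c cs =>
      by_cases hc : ch = c
      · subst hc
        simp only [PySem.Chars.count.go]
        rw [if_pos (by simp [List.isPrefixOf])]
        rw [show List.drop [ch].length (ch :: cs) = cs from rfl]
        rw [ih cs (acc + 1) (by simpa using h)]
        simp [List.count_cons]
        omega
      · simp only [PySem.Chars.count.go]
        rw [if_neg (by simp [List.isPrefixOf]; exact fun hh => hc hh)]
        rw [ih cs acc (by simpa using h)]
        simp [List.count_cons]
        intro hh; exact absurd hh.symm hc

theorem pv_count_single (l : List Char) (ch : Char) :
    PySem.Chars.count l [ch] = l.count ch := by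
  simp [PySem.Chars.count]
  simpa using pv_countGo_single ch l.length l 0 le_rfl

theorem pv_countGo_double :
    ∀ (fuel : Nat) (l : List Char) (acc : Nat), l.length ≤ fuel →
      PySem.Chars.count.go [' ', ' '] fuel l acc = acc + pvDC false l := by
  intro fuel
  induction fuel with
  | zero =>
    intro l acc h
    have : l = [] := List.eq_nil_of_length_eq_zero (Nat.le_zero.mp h)
    subst this; simp [PySem.Chars.count.go, pvDC]
  | succ n ih =>
    intro l acc h
    cases l with
    | nil => simp [PySem.Chars.count.go, pvDC]
    | cons c cs =>
      simp only [List.length_cons] at h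
      by_cases hc : c = ' '
      · subst hc
        cases cs with
        | nil =>
          simp only [PySem.Chars.count.go]
          rw [if_neg (by simp [List.isPrefixOf])]
          simp [pv_go_nil, pvDC]
        | cons c' cs' =>
          simp only [List.length_cons] at h
          by_cases hc' : c' = ' '
          · subst hc'
            simp only [PySem.Chars.count.go]
            rw [if_pos (by simp [List.isPrefixOf])]
            rw [show List.drop [' ', ' '].length (' ' :: ' ' :: cs') = cs' from rfl]
            rw [ih cs' (acc + 1) (by omega)]
            simp [pvDC]; omega
          · simp only [PySem.Chars.count.go]
            rw [if_neg (by
              simp [List.isPrefixOf]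
              exact fun hh => hc' hh.symm)]
            rw [ih (c' :: cs') acc (by simp; omega)]
            simp [pvDC, hc']
      · simp only [PySem.Chars.count.go]
        rw [if_neg (by simp [List.isPrefixOf]; exact fun hh => absurd hh.symm hc)]
        rw [ih cs acc (by omega)]
        simp [pvDC, hc]

theorem pv_count_double (l : List Char) :
    PySem.Chars.count l [' ', ' '] = pvDC false l := by
  simp [PySem.Chars.count]
  simpa using pv_countGo_double l.length l 0 le_rfl

theorem pv_splitGo :
    ∀ (fuel : Nat) (l cur : List Char) (acc : List (List Char)), l.length ≤ fuel →
      PySem.Chars.splitOn.go ['\n'] fuel l cur acc = acc.reverse ++ pvLines cur.reverse l := by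
  intro fuel
  induction fuel with
  | zero =>
    intro l cur acc h
    have : l = [] := List.eq_nil_of_length_eq_zero (Nat.le_zero.mp h)
    subst this; simp [PySem.Chars.splitOn.go, pvLines]
  | succ n ih =>
    intro l cur acc h
    cases l with
    | nil => simp [PySem.Chars.splitOn.go, pvLines]
    | cons c cs =>
      simp only [List.length_cons] at h
      by_cases hc : c = '\n'
      · subst hc
        simp only [PySem.Chars.splitOn.go]
        rw [if_pos (by simp [List.isPrefixOf])]
        rw [show List.drop ['\n'].length ('\n' :: cs) = cs from rfl]
        rw [ih cs [] (cur.reverse :: acc) (by omega)]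
        simp [pvLines]
      · simp only [PySem.Chars.splitOn.go]
        rw [if_neg (by simp [List.isPrefixOf]; exact fun hh => hc hh.symm)]
        rw [ih cs (c :: cur) acc (by omega)]
        simp [pvLines, hc]

theorem pv_splitOn_newline (l : List Char) :
    PySem.Chars.splitOn l ['\n'] = pvLines [] l := by
  simp [PySem.Chars.splitOn]
  rw [pv_splitGo (l.length + 1) l [] [] (by omega)]
  simp

theorem pv_lines_any (l : List Char) :
    ∀ pre, (pvLines pre l).any (fun ln => decide (ln.count ',' > 3)) = pvCA (pre.count ',') l := by
  induction l with
  | nil => intro pre; simp [pvLines, pvCA]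
  | cons c cs ih =>
    intro pre
    by_cases hc : c = '\n'
    · subst hc
      rw [show pvLines pre ('\n' :: cs) = pre :: pvLines [] cs from by simp [pvLines]]
      rw [show pvCA (pre.count ',') ('\n' :: cs) = (decide (pre.count ',' > 3) || pvCA 0 cs) from by
        simp [pvCA]]
      rw [List.any_cons]
      rw [show pvCA 0 cs = pvCA (List.count ',' ([] : List Char)) cs from by simp]
      rw [← ih []]
    · rw [show pvLines pre (c :: cs) = pvLines (pre ++ [c]) cs from by simp [pvLines, hc]]
      rw [ih (pre ++ [c])]
      by_cases hc2 : c = ','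
      · subst hc2
        rw [show pvCA (pre.count ',') (',' :: cs) = pvCA (pre.count ',' + 1) cs from by simp [pvCA]]
        simp [List.count_append]
      · rw [show pvCA (pre.count ',') (c :: cs) = pvCA (pre.count ',') cs from by simp [pvCA, hc, hc2]]
        have : (pre ++ [c]).count ',' = pre.count ',' := by
          simp [List.count_append, List.count_cons]
          exact hc2
        rw [this]

theorem pvCA_of_gt (cs : List Char) : ∀ com, com > 3 → pvCA com cs = true := by
  induction cs with
  | nil => intro com h; simp [pvCA]; omega
  | cons c cs ih =>
    intro com h
    simp only [pvCA]
    split_ifs with h1 h2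
    · simp; omega
    · exact ih (com + 1) (by omega)
    · exact ih com h

theorem pv_loop_spec (cs : List Char) :
    ∀ (p t d : Nat) (pend : Bool) (com : Nat), p ≤ 5 → t ≤ 5 → d ≤ 10 → com ≤ 3 →
      pvAltLoop cs p t d pend com =
        (decide (p + cs.count '|' > 5) || decide (t + cs.count '\t' > 5) ||
         decide (d + pvDC pend cs > 10) || pvCA com cs) := by
  induction cs with
  | nil =>
    intro p t d pend com hp ht hd hcom
    simp [pvAltLoop, pvDC, pvCA]
    omega
  | cons c cs ih =>
    intro p t d pend com hp ht hd hcom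
    by_cases h1 : c = '|'
    · subst h1
      rw [show pvAltLoop ('|' :: cs) p t d pend com =
          (if p + 1 > 5 then true else pvAltLoop cs (p + 1) t d false com) from by
        simp [pvAltLoop]]
      rw [show List.count '|' ('|' :: cs) = List.count '|' cs + 1 from by simp [List.count_cons]]
      rw [show List.count '\t' ('|' :: cs) = List.count '\t' cs from by simp [List.count_cons]]
      rw [show pvDC pend ('|' :: cs) = pvDC false cs from by simp [pvDC]]
      rw [show pvCA com ('|' :: cs) = pvCA com cs from by simp [pvCA]]
      by_cases hp6 : p + 1 > 5
      · rw [if_pos hp6]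
        have hgt : p + (List.count '|' cs + 1) > 5 := by omega
        simp [hgt]
      · rw [if_neg hp6, ih (p + 1) t d false com (by omega) ht hd hcom]
        rw [show p + 1 + List.count '|' cs = p + (List.count '|' cs + 1) from by omega]
    · by_cases h2 : c = '\t'
      · subst h2
        rw [show pvAltLoop ('\t' :: cs) p t d pend com =
            (if t + 1 > 5 then true else pvAltLoop cs p (t + 1) d false com) from by
          simp [pvAltLoop]]
        rw [show List.count '\t' ('\t' :: cs) = List.count '\t' cs + 1 from by simp [List.count_cons]]
        rw [show List.count '|' ('\t' :: cs) = List.count '|' cs from by simp [List.count_cons]]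
        rw [show pvDC pend ('\t' :: cs) = pvDC false cs from by simp [pvDC]]
        rw [show pvCA com ('\t' :: cs) = pvCA com cs from by simp [pvCA]]
        by_cases ht6 : t + 1 > 5
        · rw [if_pos ht6]
          have hgt : t + (List.count '\t' cs + 1) > 5 := by omega
          simp [hgt]
        · rw [if_neg ht6, ih p (t + 1) d false com hp (by omega) hd hcom]
          rw [show t + 1 + List.count '\t' cs = t + (List.count '\t' cs + 1) from by omega]
      · by_cases h3 : c = ' '
        · subst h3
          rw [show List.count '|' (' ' :: cs) = List.count '|' cs from by simp [List.count_cons]]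
          rw [show List.count '\t' (' ' :: cs) = List.count '\t' cs from by simp [List.count_cons]]
          rw [show pvCA com (' ' :: cs) = pvCA com cs from by simp [pvCA]]
          cases pend with
          | false =>
            rw [show pvAltLoop (' ' :: cs) p t d false com = pvAltLoop cs p t d true com from by
              simp [pvAltLoop]]
            rw [show pvDC false (' ' :: cs) = pvDC true cs from by simp [pvDC]]
            exact ih p t d true com hp ht hd hcom
          | true =>
            rw [show pvAltLoop (' ' :: cs) p t d true com =
                (if d + 1 > 10 then true else pvAltLoop cs p t (d + 1) false com) from by
              simp [pvAltLoop]]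
            rw [show pvDC true (' ' :: cs) = 1 + pvDC false cs from by simp [pvDC]]
            by_cases hd10 : d + 1 > 10
            · rw [if_pos hd10]
              have hgt : d + (1 + pvDC false cs) > 10 := by omega
              simp [hgt]
            · rw [if_neg hd10, ih p t (d + 1) false com hp ht (by omega) hcom]
              rw [show d + 1 + pvDC false cs = d + (1 + pvDC false cs) from by omega]
        · by_cases h4 : c = '\n'
          · subst h4
            rw [show pvAltLoop ('\n' :: cs) p t d pend com = pvAltLoop cs p t d false 0 from by
              simp [pvAltLoop]]
            rw [show List.count '|' ('\n' :: cs) = List.count '|' cs from by simp [List.count_cons]]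
            rw [show List.count '\t' ('\n' :: cs) = List.count '\t' cs from by simp [List.count_cons]]
            rw [show pvDC pend ('\n' :: cs) = pvDC false cs from by simp [pvDC]]
            rw [show pvCA com ('\n' :: cs) = (decide (com > 3) || pvCA 0 cs) from by simp [pvCA]]
            rw [show (decide (com > 3)) = false from by simp; omega]
            rw [ih p t d false 0 hp ht hd (by omega)]
            simp
          · by_cases h5 : c = ','
            · subst h5
              rw [show pvAltLoop (',' :: cs) p t d pend com =
                  (if com + 1 > 3 then true else pvAltLoop cs p t d false (com + 1)) from by
                simp [pvAltLoop]]
              rw [show List.count '|' (',' :: cs) = List.count '|' cs from by simp [List.count_cons]]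
              rw [show List.count '\t' (',' :: cs) = List.count '\t' cs from by simp [List.count_cons]]
              rw [show pvDC pend (',' :: cs) = pvDC false cs from by simp [pvDC]]
              rw [show pvCA com (',' :: cs) = pvCA (com + 1) cs from by simp [pvCA]]
              by_cases hm : com + 1 > 3
              · rw [if_pos hm, pvCA_of_gt cs (com + 1) hm]
                simp
              · rw [if_neg hm]
                exact ih p t d false (com + 1) hp ht hd (by omega)
            · rw [show pvAltLoop (c :: cs) p t d pend com = pvAltLoop cs p t d false com from by
                simp [pvAltLoop, h1, h2, h3, h4, h5]]
              rw [show List.count '|' (c :: cs) = List.count '|' cs from by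
                simp [List.count_cons]; exact fun hh => absurd hh h1]
              rw [show List.count '\t' (c :: cs) = List.count '\t' cs from by
                simp [List.count_cons]; exact fun hh => absurd hh h2]
              rw [show pvDC pend (c :: cs) = pvDC false cs from by simp [pvDC, h3]]
              rw [show pvCA com (c :: cs) = pvCA com cs from by simp [pvCA, h4, h5]]
              exact ih p t d false com hp ht hd hcom

-- ===== VERDICT (by name: the statement is the Claim_ definition above) =====
theorem likely_contains_table_py_spec : Claim_equal_likely_contains_table_py := by
  intro text _
  unfold Spec_likely_contains_table_py likely_contains_table_py likely_contains_table_py_alt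
  rw [pv_loop_spec text.toList 0 0 0 false 0 (by omega) (by omega) (by omega) (by omega)]
  have h1 : PySem.Str.count text "|" = text.toList.count '|' := by
    rw [show PySem.Str.count text "|" = PySem.Chars.count text.toList ['|'] from rfl]
    exact pv_count_single text.toList '|'
  have h2 : PySem.Str.count text "\t" = text.toList.count '\t' := by
    rw [show PySem.Str.count text "\t" = PySem.Chars.count text.toList ['\t'] from rfl]
    exact pv_count_single text.toList '\t'
  have h3 : PySem.Str.count text "  " = pvDC false text.toList := by
    rw [show PySem.Str.count text "  " = PySem.Chars.count text.toList [' ', ' '] from rfl]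
    exact pv_count_double text.toList
  have h4 : PySem.Str.split? text "\n" = some ((pvLines [] text.toList).map String.ofList) := by
    rw [show PySem.Str.split? text "\n"
        = Option.map (fun x => List.map String.ofList x) (PySem.Chars.split? text.toList ['\n']) from rfl]
    rw [show PySem.Chars.split? text.toList ['\n'] = some (PySem.Chars.splitOn text.toList ['\n']) from by
      simp [PySem.Chars.split?]]
    rw [pv_splitOn_newline]
    rfl
  rw [h1, h2, h3, h4]
  simp only [Option.getD_some, List.any_map]
  have hlines : ((pvLines [] text.toList).any
      ((fun line => decide (PySem.Str.count line "," > 3)) ∘ String.ofList))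
      = pvCA 0 text.toList := by
    rw [show pvCA 0 text.toList = pvCA (List.count ',' ([] : List Char)) text.toList from by simp]
    rw [← pv_lines_any text.toList []]
    refine List.any_congr rfl ?_
    intro ln
    simp only [Function.comp_apply]
    rw [show PySem.Str.count (String.ofList ln) ","
        = PySem.Chars.count (String.ofList ln).toList [','] from rfl]
    rw [show (String.ofList ln).toList = ln from by simp]
    rw [pv_count_single]
  rw [hlines]
  show _ = _
  simp [Bool.or_assoc]
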